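-- pv_equiv track=rewrite | github.com/Lucasmind/LearningTool | prompt_engineer.py | build_lineage_context
-- ===== SOURCE A (Python) =====
-- def build_lineage_context(session_data: dict, node_id: str) -> str:
--     """Walk parent chain from node_id to root, collecting prompt+response pairs."""
--     if not session_data or not node_id:
--         return ""
--
--     nodes = session_data.get("nodes", {})
--     parts = []
--     current_id = node_id
--
--     while current_id and current_id in nodes:
--         node = nodes[current_id]
--         prompt = node.get("prompt_text", "")
--         response = node.get("response_text", "")
--         # Truncate long responses to avoid prompt bloat
--         if len(response) > 1500:
--             response = response[:1500] + "..."
--         parts.append(f"User asked: {prompt}\nAI responded: {response}")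
--         current_id = node.get("parent_id")
--
--     parts.reverse()  # Root first
--     return "\n\n---\n\n".join(parts)
-- ===== SOURCE B (Python) =====
-- def build_lineage_context(session_data: dict, node_id: str) -> str:
--     """Walk parent chain from node_id to root, collecting prompt+response pairs.
--
--     Builds the result string directly by prepending each ancestor's block above
--     the context accumulated so far (no list, no reverse, no join), and marks
--     each node as used so a cyclic parent chain terminates instead of looping.
--     """
--     if not session_data or not node_id:
--         return ""
--
--     nodes = session_data.get("nodes", {})
--     remaining = set(nodes)  # each node contributes at most once
--     context = ""
--     current_id = node_id
--
--     while current_id and current_id in remaining: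
--         node = nodes[current_id]
--         response = node.get("response_text", "")
--         if len(response) > 1500:
--             response = response[:1500] + "..."
--         part = f"User asked: {node.get('prompt_text', '')}\nAI responded: {response}"
--         context = part if not context else part + "\n\n---\n\n" + context
--         remaining.discard(current_id)
--         current_id = node.get("parent_id")
--
--     return context
-- ===== Notes on version B (the rewrite author's own statement) =====
-- stated objective: alternative
-- what changed: Replaced A's append-to-a-list/reverse/join while-loop with a loop that builds the result string directly by prepending each ancestor's block above the context collected so far (no list, no reverse, no join), and tracks the set of not-yet-used node ids so a cyclic parent chain terminates instead of looping forever.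
import Mathlib
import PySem

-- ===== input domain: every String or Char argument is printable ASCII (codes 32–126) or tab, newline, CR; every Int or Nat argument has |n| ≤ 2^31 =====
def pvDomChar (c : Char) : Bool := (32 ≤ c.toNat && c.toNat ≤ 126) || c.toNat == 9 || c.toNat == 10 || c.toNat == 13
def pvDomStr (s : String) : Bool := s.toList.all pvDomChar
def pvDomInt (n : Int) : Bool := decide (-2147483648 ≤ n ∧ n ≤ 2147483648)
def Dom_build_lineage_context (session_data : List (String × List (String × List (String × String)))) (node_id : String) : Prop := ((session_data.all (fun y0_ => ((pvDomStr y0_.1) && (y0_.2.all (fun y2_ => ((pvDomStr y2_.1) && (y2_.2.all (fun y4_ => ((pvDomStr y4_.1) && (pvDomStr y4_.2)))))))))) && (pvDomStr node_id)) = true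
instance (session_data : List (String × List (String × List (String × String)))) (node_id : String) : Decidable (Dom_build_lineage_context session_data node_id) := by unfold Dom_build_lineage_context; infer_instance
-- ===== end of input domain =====

-- B builds the context string directly, prepending each ancestor's block above the part of the
-- chain already collected (no list, no reverse, no join) and marking each node as used so a
-- cyclic parent chain terminates where A's while-loop runs forever (objective: alternative).

-- ===== PORT A =====
-- the f-string part for one node (prompt + possibly truncated response)
def pvPartA (node : List (String × String)) : String :=
  let prompt := PySem.Dict.getD (PySem.Dict.mk node) "prompt_text" ""
  let response := PySem.Dict.getD (PySem.Dict.mk node) "response_text" ""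
  let response := if PySem.Str.len response > 1500
    then PySem.Str.slice response none (some 1500) ++ "..." else response
  "User asked: " ++ prompt ++ "\nAI responded: " ++ response

-- the while loop: state = (parts accumulator, current_id : Option String); fuel = |nodes|+1,
-- never exhausted under Pre_ (the chain then visits each key at most once)
def pvWalkA (nodes : List (String × List (String × String))) :
    Nat → List String → Option String → List String
  | 0, parts, _ => parts
  | fuel + 1, parts, cid? =>
    match cid? with
    | none => parts
    | some cid =>
      if cid = "" then parts
      else
        match PySem.Dict.get? (PySem.Dict.mk nodes) cid with
        | none => parts
        | some node =>
            pvWalkA nodes fuel (parts ++ [pvPartA node])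
              (PySem.Dict.get? (PySem.Dict.mk node) "parent_id")

def build_lineage_context (session_data : List (String × List (String × List (String × String)))) (node_id : String) : String :=
  if session_data = [] ∨ node_id = "" then ""
  else
    let nodes := PySem.Dict.getD (PySem.Dict.mk session_data) "nodes" []
    let parts := pvWalkA nodes (nodes.length + 1) [] (some node_id)
    PySem.Str.join "\n\n---\n\n" parts.reverse

-- ===== PORT B =====
-- termination of B's while-loop: discarding a member strictly shrinks the remaining set
theorem pvDiscardShrinks {s : PySem.Set String} {x : String}
    (h : PySem.Set.contains s x = true) :
    (PySem.Set.discard s x).length < s.length := by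
  rw [PySem.Set.discard, List.length_filter_lt_length_iff_exists]
  exact ⟨x, (PySem.Set.contains_iff s x).mp h, by simp⟩

-- B's loop: `remaining` = the set of node ids not yet used, `context` = the string built so far
def pvWalkB (nodes : List (String × List (String × String)))
    (remaining : PySem.Set String) (context : String) (cur? : Option String) : String :=
  match cur? with
  | none => context
  | some cur =>
    if cur = "" then context
    else if hmem : PySem.Set.contains remaining cur then
      match PySem.Dict.get? (PySem.Dict.mk nodes) cur with
      | none => context
      | some node =>
        let response := PySem.Dict.getD (PySem.Dict.mk node) "response_text" ""
        let response := if PySem.Str.len response > 1500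
          then PySem.Str.slice response none (some 1500) ++ "..." else response
        let part := "User asked: " ++ PySem.Dict.getD (PySem.Dict.mk node) "prompt_text" ""
          ++ "\nAI responded: " ++ response
        pvWalkB nodes (PySem.Set.discard remaining cur)
          (if context = "" then part else part ++ "\n\n---\n\n" ++ context)
          (PySem.Dict.get? (PySem.Dict.mk node) "parent_id")
    else context
termination_by remaining.length
decreasing_by exact pvDiscardShrinks hmem

def build_lineage_context_alt (session_data : List (String × List (String × List (String × String)))) (node_id : String) : String :=
  if session_data = [] ∨ node_id = "" then ""
  else
    let nodes := PySem.Dict.getD (PySem.Dict.mk session_data) "nodes" []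
    pvWalkB nodes (PySem.Set.ofList ((PySem.Dict.mk nodes).keys)) "" (some node_id)

-- ===== PRECONDITION & SPEC =====
-- one step of the parent chain: the id the next loop iteration starts from (none once the
-- chain has left the nodes dict, i.e. where A's while-loop stops)
def pvNext (nodes : List (String × List (String × String))) : Option String → Option String
  | none => none
  | some c =>
    if c = "" then none
    else
      match PySem.Dict.get? (PySem.Dict.mk nodes) c with
      | none => none
      | some node => PySem.Dict.get? (PySem.Dict.mk node) "parent_id"

-- Pre_ excludes exactly the inputs on which Python A never returns: those whose parent chain
-- from node_id runs into a cycle, so A's while-loop loops forever. Stated closed-form: after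
-- at most |nodes| + 1 parent steps the chain from node_id has ended.
def Pre_build_lineage_context (session_data : List (String × List (String × List (String × String)))) (node_id : String) : Prop :=
  let nodes := PySem.Dict.getD (PySem.Dict.mk session_data) "nodes" []
  (pvNext nodes)^[nodes.length + 1] (some node_id) = none
instance (session_data : List (String × List (String × List (String × String)))) (node_id : String) : Decidable (Pre_build_lineage_context session_data node_id) := by unfold Pre_build_lineage_context; infer_instance

def pvWitness_build_lineage_context : (List (String × List (String × List (String × String)))) × String :=
  ([("nodes", [("root", [("prompt_text", "Hi"), ("response_text", "Hello")]),
               ("child", [("prompt_text", "More"), ("response_text", "Sure"), ("parent_id", "root")])])],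
   "child")

def Spec_build_lineage_context (session_data : List (String × List (String × List (String × String)))) (node_id : String) (out : String) : Prop := out = build_lineage_context_alt session_data node_id
instance (session_data : List (String × List (String × List (String × String)))) (node_id : String) (out : String) : Decidable (Spec_build_lineage_context session_data node_id out) := by unfold Spec_build_lineage_context; infer_instance

-- ===== CLAIM (what is proved, stated in full; the proofs are below) =====
def Claim_equal_build_lineage_context : Prop := ∀ (session_data : List (String × List (String × List (String × String)))) (node_id : String), Dom_build_lineage_context session_data node_id → Pre_build_lineage_context session_data node_id → Spec_build_lineage_context session_data node_id (build_lineage_context session_data node_id)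

-- ===== LEMMAS AND PROOFS =====
-- proof-side reformulation of Pre_: walking parents from `cur?`, every node looked up is
-- still in `unused` (the chain never revisits a node)
def pvNoRevisit (nodes : List (String × List (String × String)))
    (unused : PySem.Set String) (cur? : Option String) : Bool :=
  match cur? with
  | none => true
  | some cur =>
    if cur = "" then true
    else
      match PySem.Dict.get? (PySem.Dict.mk nodes) cur with
      | none => true
      | some node =>
        if hseen : PySem.Set.contains unused cur then
          pvNoRevisit nodes (PySem.Set.discard unused cur)
            (PySem.Dict.get? (PySem.Dict.mk node) "parent_id")
        else false
termination_by unused.length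
decreasing_by exact pvDiscardShrinks hseen

theorem pvNext_none (nodes : List (String × List (String × String))) (t : Nat) :
    (pvNext nodes)^[t] none = none :=
  Function.iterate_fixed rfl t

-- a state the chain returns to is never cleared: once some cur recurs, no iterate is none
theorem pvPeriodic_ne_none (nodes : List (String × List (String × String)))
    (cur : String) (j : Nat) (hj : 0 < j)
    (hfix : (pvNext nodes)^[j] (some cur) = some cur) :
    ∀ m, (pvNext nodes)^[m] (some cur) ≠ none := by
  intro m hm
  have hmul : ∀ q, (pvNext nodes)^[j * q] (some cur) = some cur := by
    intro q
    rw [Function.iterate_mul]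
    exact Function.iterate_fixed hfix q
  have hrm : (pvNext nodes)^[m % j] (some cur) = none := by
    rw [show m = m % j + j * (m / j) from (Nat.mod_add_div m j).symm,
      Function.iterate_add_apply, hmul] at hm
    exact hm
  have : (pvNext nodes)^[j] (some cur) = none := by
    have hsplit : j = (j - m % j) + m % j := by
      have := Nat.mod_lt m hj
      omega
    rw [hsplit, Function.iterate_add_apply, hrm, pvNext_none]
  simp [hfix] at this

-- a looked-up id is one of the dict's keys
theorem pvKey_mem (c : String) (v : List (String × String)) :
    ∀ N : List (String × List (String × String)),
      PySem.Dict.get? (PySem.Dict.mk N) c = some v → c ∈ (PySem.Dict.mk N).keys := by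
  intro N
  induction N with
  | nil => intro h; simp [PySem.Dict.get?] at h
  | cons p t ih =>
    intro h
    rw [PySem.Dict.get?_mk_cons] at h
    by_cases hk : p.1 = c
    · simp [PySem.Dict.keys, hk]
    · rw [if_neg (by simpa using hk)] at h
      simpa [PySem.Dict.keys] using Or.inr (by simpa [PySem.Dict.keys] using ih h)

-- a chain that ends never revisits a node: every id it looks up is still unused
theorem pvNoRevisit_of_iterate_none (nodes : List (String × List (String × String))) :
    ∀ (k : Nat) (cur? : Option String) (unused : PySem.Set String),
      (pvNext nodes)^[k] cur? = none →
      (∀ (c : String) (node : List (String × String)), (∃ i, (pvNext nodes)^[i] cur? = some c) →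
        PySem.Dict.get? (PySem.Dict.mk nodes) c = some node → c ∈ unused) →
      pvNoRevisit nodes unused cur? = true := by
  intro k
  induction k with
  | zero =>
    intro cur? unused hk _
    simp only [Function.iterate_zero, id] at hk
    subst hk; rw [pvNoRevisit]
  | succ k ih =>
    intro cur? unused hk hmem
    cases cur? with
    | none => rw [pvNoRevisit]
    | some cur =>
      rw [pvNoRevisit]
      by_cases hc : cur = ""
      · simp [hc]
      · rw [if_neg hc]
        cases hg : PySem.Dict.get? (PySem.Dict.mk nodes) cur with
        | none => rfl
        | some node =>
          have hcur : cur ∈ unused := hmem cur node ⟨0, rfl⟩ hg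
          show (if _ : PySem.Set.contains unused cur then
              pvNoRevisit nodes (PySem.Set.discard unused cur)
                (PySem.Dict.get? (PySem.Dict.mk node) "parent_id")
            else false) = true
          rw [dif_pos ((PySem.Set.contains_iff unused cur).mpr hcur)]
          have hstep : pvNext nodes (some cur) = PySem.Dict.get? (PySem.Dict.mk node) "parent_id" := by
            simp [pvNext, hc, hg]
          apply ih
          · rw [← hstep, ← Function.iterate_succ_apply]
            exact hk
          · intro c nd ⟨i, hi⟩ hgc
            have hci : (pvNext nodes)^[i + 1] (some cur) = some c := by
              rw [Function.iterate_succ_apply, hstep]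
              exact hi
            have hne : c ≠ cur := by
              intro he
              subst he
              exact pvPeriodic_ne_none nodes c (i + 1) (by omega) hci (k + 1) hk
            have : c ∈ unused := hmem c nd ⟨i + 1, hci⟩ hgc
            exact (PySem.Set.mem_discard _ _ _).mpr ⟨this, hne⟩

theorem pvJoin_singleton (sep x : String) : PySem.Str.join sep [x] = x := by
  apply String.toList_inj.mp
  simp [PySem.Str.join, PySem.Chars.join, List.intercalate]

theorem pvJoin_cons_cons (sep x y : String) (l : List String) :
    PySem.Str.join sep (x :: y :: l) = x ++ sep ++ PySem.Str.join sep (y :: l) := by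
  apply String.toList_inj.mp
  simp [PySem.Str.join, PySem.Chars.join, List.intercalate, String.toList_append]

theorem pvToList_ne_nil {x : String} (h : x ≠ "") : x.toList ≠ [] := by
  intro hl; exact h (String.toList_inj.mp (by simp [hl]))

theorem pvJoin_cons_ne_empty (sep x : String) (l : List String) (hx : x ≠ "") :
    PySem.Str.join sep (x :: l) ≠ "" := by
  intro h
  apply pvToList_ne_nil hx
  cases l with
  | nil => rw [pvJoin_singleton] at h; simp [h]
  | cons y t =>
    rw [pvJoin_cons_cons] at h
    have := congrArg String.toList h
    simp [String.toList_append] at this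
    simp [this.1]

theorem pvPartA_ne_empty (node : List (String × String)) : pvPartA node ≠ "" := by
  intro h
  have := congrArg String.toList h
  simp only [pvPartA, String.toList_append] at this
  simp at this

-- the core correspondence: A's fuel loop (accumulating parts child-first, joined reversed at the
-- end) equals B's set-guarded loop (prepending blocks), as long as the chain never revisits a node
theorem pvWalkA_eq_pvWalkB (nodes : List (String × List (String × String))) :
    ∀ (fuel : Nat) (remaining : PySem.Set String) (cur? : Option String) (parts : List String),
      pvNoRevisit nodes remaining cur? = true →
      remaining.length < fuel →
      (∀ s ∈ parts, s ≠ "") →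
      PySem.Str.join "\n\n---\n\n" (pvWalkA nodes fuel parts cur?).reverse
        = pvWalkB nodes remaining (PySem.Str.join "\n\n---\n\n" parts.reverse) cur? := by
  intro fuel
  induction fuel with
  | zero => intro remaining cur? parts _ hlt; omega
  | succ f ih =>
    intro remaining cur? parts hok hlt hne
    cases cur? with
    | none => simp [pvWalkA, pvWalkB]
    | some cur =>
      by_cases hc : cur = ""
      · simp [pvWalkA, pvWalkB, hc]
      · cases hg : PySem.Dict.get? (PySem.Dict.mk nodes) cur with
        | none =>
          rw [pvWalkB]
          simp only [pvWalkA, if_neg hc, hg]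
          split <;> simp
        | some node =>
          rw [pvNoRevisit] at hok
          simp only [if_neg hc, hg] at hok
          rcases hmem : PySem.Set.contains remaining cur with _ | _
          · rw [dif_neg (fun hh => Bool.false_ne_true (hmem ▸ hh))] at hok
            exact absurd hok (by simp)
          · rw [dif_pos hmem] at hok
            rw [pvWalkB]
            simp only [pvWalkA, if_neg hc, hg, dif_pos hmem]
            have hctx : PySem.Str.join "\n\n---\n\n" (parts ++ [pvPartA node]).reverse
                = (if PySem.Str.join "\n\n---\n\n" parts.reverse = ""
                   then pvPartA node
                   else pvPartA node ++ "\n\n---\n\n" ++ PySem.Str.join "\n\n---\n\n" parts.reverse) := by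
              rw [List.reverse_append]
              cases hp : parts.reverse with
              | nil => simp [PySem.Str.join, PySem.Chars.join, List.intercalate]
              | cons y t =>
                have hy : y ≠ "" := hne y (by
                  have : y ∈ parts.reverse := by rw [hp]; exact List.mem_cons_self
                  simpa using this)
                rw [if_neg (pvJoin_cons_ne_empty _ _ _ hy)]
                simpa using pvJoin_cons_cons "\n\n---\n\n" (pvPartA node) y t
            have := ih (PySem.Set.discard remaining cur)
              (PySem.Dict.get? (PySem.Dict.mk node) "parent_id")
              (parts ++ [pvPartA node]) hok
              (by have := pvDiscardShrinks hmem; omega)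
              (by intro s hs
                  rcases List.mem_append.mp hs with h | h
                  · exact hne s h
                  · simp at h; subst h; exact pvPartA_ne_empty node)
            rw [this, hctx]
            simp [pvPartA]

-- ===== VERDICT (by name: the statement is the Claim_ definition above) =====
theorem build_lineage_context_spec : Claim_equal_build_lineage_context := by
  intro sd nid _ hpre
  unfold Spec_build_lineage_context build_lineage_context build_lineage_context_alt
  by_cases h : sd = [] ∨ nid = ""
  · simp [h]
  · simp only [h, if_false]
    set N := PySem.Dict.getD (PySem.Dict.mk sd) "nodes" [] with hN
    have hok : pvNoRevisit N (PySem.Set.ofList ((PySem.Dict.mk N).keys)) (some nid) = true := by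
      apply pvNoRevisit_of_iterate_none N (N.length + 1) (some nid) _ hpre
      intro c node _ hgc
      exact (PySem.Set.mem_ofList _ _).mpr (pvKey_mem c node N hgc)
    have hlen : (PySem.Set.ofList ((PySem.Dict.mk N).keys)).length < N.length + 1 := by
      have h1 := PySem.Set.length_ofList_le (xs := (PySem.Dict.mk N).keys)
      have h2 : ((PySem.Dict.mk N).keys).length = N.length := by
        simp [PySem.Dict.keys]
      omega
    have := pvWalkA_eq_pvWalkB N (N.length + 1)
      (PySem.Set.ofList ((PySem.Dict.mk N).keys)) (some nid) [] hok hlen (by simp)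
    simpa using this
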